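-- pv_equiv track=rewrite | github.com/daniel-reich/turbo-robot | F77JQs68RSeTBiGtv_15.py | diamond_sum
-- ===== SOURCE A (Python) =====
-- def diamond_sum(n):
--
--   #   Building Diamond
--
--   Diamond = []
--
--   Number = 1
--   Ceiling = n * n
--
--   while (Number <= Ceiling):
--
--     Batch = []
--     Added = 0
--     Required = n
--
--     while (Added < Required):
--       Batch.append(Number)
--       Added += 1
--       Number += 1
--
--     Diamond.append(Batch)
--
--   #   Bucket for Total
--   Total = 0
--
--   #   Going Down from Top Middle
--   Cursor_A = int((n - 1) / 2)
--   Cursor_B = int((n - 1) / 2)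
--   Row = 0
--
--   while (Cursor_A >= 0):
--
--     if (Cursor_A == Cursor_B):
--
--       Value_A = Diamond[Row][Cursor_A]
--       Total += Value_A
--
--       Cursor_A -= 1
--       Cursor_B += 1
--       Row += 1
--
--     else:
--
--       Value_A = Diamond[Row][Cursor_A]
--       Total += Value_A
--
--       Value_B = Diamond[Row][Cursor_B]
--       Total += Value_B
--
--       Cursor_A -= 1
--       Cursor_B += 1
--       Row += 1
--
--   #   Going Up from Bottom Middle
--   Cursor_A = int((n - 1) / 2)
--   Cursor_B = int((n - 1) / 2)
--   Row = -1
--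
--   while (Cursor_A > 0):
--
--     if (Cursor_A == Cursor_B):
--
--       Value_A = Diamond[Row][Cursor_A]
--       Total += Value_A
--
--       Cursor_A -= 1
--       Cursor_B += 1
--       Row -= 1
--
--     else:
--
--       Value_A = Diamond[Row][Cursor_A]
--       Total += Value_A
--
--       Value_B = Diamond[Row][Cursor_B]
--       Total += Value_B
--
--       Cursor_A -= 1
--       Cursor_B += 1
--       Row -= 1
--
--   #   Giving Answer
--   return Total
-- ===== SOURCE B (Python) =====
-- def diamond_sum(n):
--     # Closed form: the diamond consists of the centre row cells and, for each
--     # offset, a symmetric pair on both diagonals; summing r*n + c + 1 along the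
--     # diamond path collapses to a polynomial in n and m = (n-1)//2.
--     m = (n - 1) // 2
--     if n < 3:
--         return 1
--     return (2 * m - 1) * n * n + n + 4 * m * m + 4 * m
-- ===== Notes on version B (the rewrite author's own statement) =====
-- stated objective: faster
-- what changed: Replace building the n-row grid and walking both diamond diagonals cell by cell with a closed-form polynomial in n and m=(n-1)//2 derived from summing r*n+c+1 along the diamond path.
-- outside the precondition, e.g. on diamond_sum(0): A raises IndexError, B returns 1; on diamond_sum(-1): A does not finish within the time limit, B returns 1
import Mathlib
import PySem

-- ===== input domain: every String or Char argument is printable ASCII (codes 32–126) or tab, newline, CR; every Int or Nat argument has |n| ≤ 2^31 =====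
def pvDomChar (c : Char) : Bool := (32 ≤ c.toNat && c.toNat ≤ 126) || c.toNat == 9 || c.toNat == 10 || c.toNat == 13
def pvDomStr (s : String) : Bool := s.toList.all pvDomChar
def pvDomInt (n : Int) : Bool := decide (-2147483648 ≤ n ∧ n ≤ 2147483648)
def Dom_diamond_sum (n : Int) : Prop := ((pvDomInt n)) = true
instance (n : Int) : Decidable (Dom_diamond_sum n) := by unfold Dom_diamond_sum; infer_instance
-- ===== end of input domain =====

-- B replaces A's O(n^2) grid construction and diagonal walk by a closed-form polynomial (objective: faster, asymptotic).

-- ===== PORT A =====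
-- inner while: Batch.append(Number); Added += 1; Number += 1
def pvBatch (number added required : Int) : List Int :=
  if added < required then number :: pvBatch (number + 1) (added + 1) required
  else []
termination_by (required - added).toNat
decreasing_by omega

-- outer while Number <= Ceiling; the extra '1 ≤ n' guard only stops where Python diverges (n ≤ 0, outside Pre_)
def pvBuild (n ceiling number : Int) : List (List Int) :=
  if number ≤ ceiling ∧ 1 ≤ n then
    pvBatch number 0 n :: pvBuild n ceiling (number + n)
  else []
termination_by (ceiling + 1 - number).toNat
decreasing_by omega

-- Diamond[Row][Cursor]: both indices are in range on every input admitted by Pre_, so the defaults are never used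
def pvCell (d : List (List Int)) (row cursor : Int) : Int :=
  PySem.List.pyGetD (PySem.List.pyGetD d row []) cursor 0

-- 'Going Down from Top Middle' while loop
def pvDownA (d : List (List Int)) (cursorA cursorB row total : Int) : Int :=
  if cursorA ≥ 0 then
    if cursorA == cursorB then
      pvDownA d (cursorA - 1) (cursorB + 1) (row + 1) (total + pvCell d row cursorA)
    else
      pvDownA d (cursorA - 1) (cursorB + 1) (row + 1)
        (total + pvCell d row cursorA + pvCell d row cursorB)
  else total
termination_by (cursorA + 1).toNat
decreasing_by all_goals omega

-- 'Going Up from Bottom Middle' while loop (negative Row: Python indexing from the end)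
def pvUpA (d : List (List Int)) (cursorA cursorB row total : Int) : Int :=
  if cursorA > 0 then
    if cursorA == cursorB then
      pvUpA d (cursorA - 1) (cursorB + 1) (row - 1) (total + pvCell d row cursorA)
    else
      pvUpA d (cursorA - 1) (cursorB + 1) (row - 1)
        (total + pvCell d row cursorA + pvCell d row cursorB)
  else total
termination_by cursorA.toNat
decreasing_by all_goals omega

def diamond_sum (n : Int) : Int :=
  let diamond := pvBuild n (n * n) 1
  -- int((n - 1) / 2): float division then int() truncates toward zero; exact on Dom (|n| ≤ 2^31 « 2^53) = Int.div
  let start := Int.tdiv (n - 1) 2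
  let t1 := pvDownA diamond start start 0 0
  pvUpA diamond start start (-1) t1

-- ===== PORT B =====
def diamond_sum_alt (n : Int) : Int :=
  let m := PySem.Int.floordiv (n - 1) 2
  if n < 3 then 1
  else (2 * m - 1) * n * n + n + 4 * m * m + 4 * m

-- ===== PRECONDITION & SPEC =====
-- Pre_ excludes n ≤ 0 only: at n = 0 Python A raises IndexError (empty grid), for n < 0 it never terminates.
def Pre_diamond_sum (n : Int) : Prop := 1 ≤ n
instance (n : Int) : Decidable (Pre_diamond_sum n) := by unfold Pre_diamond_sum; infer_instance
def pvWitness_diamond_sum : Int := (3)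

def Spec_diamond_sum (n : Int) (out : Int) : Prop := out = diamond_sum_alt n
instance (n : Int) (out : Int) : Decidable (Spec_diamond_sum n out) := by unfold Spec_diamond_sum; infer_instance

-- ===== CLAIM (what is proved, stated in full; the proofs are below) =====
def Claim_equal_diamond_sum : Prop :=
  ∀ (n : Int), Dom_diamond_sum n → Pre_diamond_sum n → Spec_diamond_sum n (diamond_sum n)

-- ===== LEMMAS AND PROOFS =====

-- the grid A builds: row r is [r*n+1, …, r*n+n]
def pvGrid (n : Int) : List (List Int) :=
  (List.range n.toNat).map (fun r : Nat => (List.range n.toNat).map (fun c : Nat => (r : Int) * n + 1 + (c : Int)))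

-- partial sum of the down walk after the iterations with Cursor_A = m, m-1, …, a+1 remain … i.e. value added for cursors a..0
def pvQdown (n m a : Int) : Int :=
  2 * (a + 1) * (m * n + 1 + m) - n * a * (a + 1) - (if a = m then m + 1 else 0)

def pvQup (n m a : Int) : Int :=
  if a ≤ 0 then 0
  else 2 * a * ((n - m - 1) * n + 1 + m) + n * a * (a + 1) - (if a = m then (n - 1) * n + 1 + m else 0)

lemma pvBatch_eq : ∀ (k : Nat) (number added required : Int), (required - added).toNat = k →
    pvBatch number added required = (List.range k).map (fun c : Nat => number + (c : Int)) := by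
  intro k
  induction k with
  | zero =>
    intro number added required h
    rw [pvBatch, if_neg (by omega)]
    rfl
  | succ k ih =>
    intro number added required h
    rw [pvBatch, if_pos (by omega)]
    rw [ih (number + 1) (added + 1) required (by omega)]
    rw [List.range_succ_eq_map]
    simp only [List.map_cons, List.map_map, Nat.cast_zero, add_zero]
    congr 1
    exact List.map_congr_left (fun x _ => by simp [Nat.succ_eq_add_one]; ring)

lemma pvBuild_eq (n : Int) (hn : 1 ≤ n) : ∀ (k : Nat), (k : Int) ≤ n →
    pvBuild n (n * n) ((n - (k : Int)) * n + 1)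
      = (List.range k).map (fun r : Nat => (List.range n.toNat).map (fun c : Nat => (n - (k:Int) + (r : Int)) * n + 1 + (c : Int))) := by
  intro k
  induction k with
  | zero =>
    intro _
    rw [pvBuild, if_neg (by push_cast; intro hcon; nlinarith [hcon.1])]
    rfl
  | succ k ih =>
    intro hk
    rw [pvBuild, if_pos ⟨by push_cast at hk ⊢; nlinarith, hn⟩]
    push_cast
    rw [pvBatch_eq n.toNat ((n - ((k:Int) + 1)) * n + 1) 0 n (by omega)]
    rw [show (n - ((k : Int) + 1)) * n + 1 + n = (n - (k : Int)) * n + 1 by ring]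
    rw [ih (by omega)]
    rw [List.range_succ_eq_map]
    simp only [List.map_cons, List.map_map]
    congr 1
    · exact List.map_congr_left (fun c _ => by push_cast; ring)
    · refine List.map_congr_left (fun r _ => ?_)
      refine List.map_congr_left (fun c _ => ?_)
      simp only [Nat.succ_eq_add_one]
      push_cast
      ring

lemma pvGrid_eq (n : Int) (hn : 1 ≤ n) : pvBuild n (n * n) 1 = pvGrid n := by
  have hcast : ((n.toNat : Int)) = n := Int.toNat_of_nonneg (by omega)
  have h := pvBuild_eq n hn n.toNat (by omega)
  rw [hcast] at h
  simp only [sub_self, zero_mul, zero_add] at h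
  rw [h, pvGrid]

lemma pvCell_pos (n r c : Int) (hr0 : 0 ≤ r) (hr1 : r < n) (hc0 : 0 ≤ c) (hc1 : c < n) :
    pvCell (pvGrid n) r c = r * n + 1 + c := by
  rw [pvCell, pvGrid]
  rw [PySem.List.pyGetD_eq_getElem _ _ hr0 (by simp; omega)]
  simp only [List.getElem_map, List.getElem_range]
  rw [PySem.List.pyGetD_eq_getElem _ _ hc0 (by simp; omega)]
  simp only [List.getElem_map, List.getElem_range]
  rw [Int.toNat_of_nonneg hr0, Int.toNat_of_nonneg hc0]

lemma pvCell_neg (n j c : Int) (hj0 : 1 ≤ j) (hj1 : j ≤ n) (hc0 : 0 ≤ c) (hc1 : c < n) :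
    pvCell (pvGrid n) (-j) c = (n - j) * n + 1 + c := by
  rw [pvCell, pvGrid]
  rw [show -j = -((j.toNat : Int)) by omega]
  rw [PySem.List.pyGetD_neg_natCast _ j.toNat _ (by omega) (by simp; omega)]
  simp only [List.length_map, List.length_range, List.getElem_map, List.getElem_range]
  rw [PySem.List.pyGetD_eq_getElem _ _ hc0 (by simp; omega)]
  simp only [List.getElem_map, List.getElem_range]
  rw [Int.toNat_of_nonneg hc0]
  have : ((n.toNat - j.toNat : Nat) : Int) = n - j := by omega
  rw [this]

lemma pvDown_eq (n m : Int) (hn : 1 ≤ n) (hm0 : 0 ≤ m) (hm1 : 2 * m ≤ n - 1) :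
    ∀ (k : Nat) (a : Int), a = (k : Int) - 1 → a ≤ m → ∀ (total : Int),
      pvDownA (pvGrid n) a (2 * m - a) (m - a) total = total + pvQdown n m a := by
  intro k
  induction k with
  | zero =>
    intro a ha _ total
    have ha' : a = -1 := by omega
    subst ha'
    rw [pvDownA, if_neg (by omega)]
    rw [pvQdown, if_neg (by omega)]
    ring
  | succ k ih =>
    intro a ha hm total
    rw [pvDownA, if_pos (by omega)]
    simp only [beq_iff_eq]
    by_cases hc : a = 2 * m - a
    · have ham : a = m := by omega
      rw [if_pos hc]
      rw [pvCell_pos n (m - a) a (by omega) (by omega) (by omega) (by omega)]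
      rw [show 2 * m - a + 1 = 2 * m - (a - 1) by ring, show m - a + 1 = m - (a - 1) by ring]
      rw [ih (a - 1) (by omega) (by omega)]
      rw [pvQdown, pvQdown, if_pos ham, if_neg (by omega)]
      subst ham
      ring
    · have ham : a ≠ m := by omega
      rw [if_neg hc]
      rw [pvCell_pos n (m - a) a (by omega) (by omega) (by omega) (by omega)]
      rw [pvCell_pos n (m - a) (2 * m - a) (by omega) (by omega) (by omega) (by omega)]
      rw [show 2 * m - a + 1 = 2 * m - (a - 1) by ring, show m - a + 1 = m - (a - 1) by ring]
      rw [ih (a - 1) (by omega) (by omega)]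
      rw [pvQdown, pvQdown, if_neg ham, if_neg (by omega)]
      ring

lemma pvUp_eq (n m : Int) (hn : 1 ≤ n) (hm0 : 0 ≤ m) (hm1 : 2 * m ≤ n - 1) :
    ∀ (k : Nat) (a : Int), a = (k : Int) → a ≤ m → ∀ (total : Int),
      pvUpA (pvGrid n) a (2 * m - a) (a - m - 1) total = total + pvQup n m a := by
  intro k
  induction k with
  | zero =>
    intro a ha _ total
    rw [pvUpA, if_neg (by omega)]
    rw [pvQup, if_pos (by omega)]
    ring
  | succ k ih =>
    intro a ha hm total
    have ha1 : 1 ≤ a := by omega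
    rw [pvUpA, if_pos (by omega)]
    simp only [beq_iff_eq]
    have hrow : a - m - 1 = -(m + 1 - a) := by ring
    by_cases hc : a = 2 * m - a
    · have ham : a = m := by omega
      rw [if_pos hc]
      rw [show 2 * m - a + 1 = 2 * m - (a - 1) by ring, show a - m - 1 - 1 = (a - 1) - m - 1 by ring]
      rw [hrow, pvCell_neg n (m + 1 - a) a (by omega) (by omega) (by omega) (by omega)]
      rw [ih (a - 1) (by omega) (by omega)]
      rw [pvQup, pvQup]
      by_cases h1 : a - 1 ≤ 0
      · rw [if_pos h1, if_neg (by omega), if_pos ham]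
        have hm1' : m = 1 := by omega
        subst hm1'
        have ha' : a = 1 := by omega
        subst ha'
        ring
      · rw [if_neg h1, if_neg (by omega), if_pos ham, if_neg (by omega)]
        subst ham
        ring
    · have ham : a ≠ m := by omega
      rw [if_neg hc]
      rw [show 2 * m - a + 1 = 2 * m - (a - 1) by ring, show a - m - 1 - 1 = (a - 1) - m - 1 by ring]
      rw [hrow, pvCell_neg n (m + 1 - a) a (by omega) (by omega) (by omega) (by omega)]
      rw [pvCell_neg n (m + 1 - a) (2 * m - a) (by omega) (by omega) (by omega) (by omega)]
      rw [ih (a - 1) (by omega) (by omega)]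
      rw [pvQup, pvQup]
      by_cases h1 : a - 1 ≤ 0
      · rw [if_pos h1, if_neg (by omega), if_neg ham]
        have ha' : a = 1 := by omega
        subst ha'
        ring
      · rw [if_neg h1, if_neg (by omega), if_neg ham, if_neg (by omega)]
        ring

-- ===== VERDICT (by name: the statement is the Claim_ definition above) =====
lemma pvFinal_arith (n q : Int) (h1 : 1 ≤ n) (h0 : 0 ≤ q) (h2 : 2 * q ≤ n - 1) (h3 : n - 1 < 2 * (q + 1)) :
    0 + pvQdown n q q + pvQup n q q = (if n < 3 then 1 else (2 * q - 1) * n * n + n + 4 * q * q + 4 * q) := by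
  by_cases hq : q = 0
  · subst hq
    rw [if_pos (by omega), pvQdown, pvQup, if_pos rfl, if_pos (by omega)]
    ring
  · rw [if_neg (by omega), pvQdown, pvQup, if_pos rfl, if_neg (by omega), if_pos rfl]
    ring

theorem diamond_sum_spec : Claim_equal_diamond_sum := by
  intro n _ hpre
  have hn : 1 ≤ n := hpre
  unfold Spec_diamond_sum diamond_sum diamond_sum_alt
  have hdiv : Int.tdiv (n - 1) 2 = (n - 1) / 2 := Int.tdiv_eq_ediv_of_nonneg (by omega)
  have hflo : PySem.Int.floordiv (n - 1) 2 = (n - 1) / 2 := PySem.Int.floordiv_eq_ediv_of_pos (by norm_num)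
  rw [hdiv, hflo]
  have h0 : 0 ≤ (n - 1) / 2 := by omega
  have h2 : 2 * ((n - 1) / 2) ≤ n - 1 := by omega
  have h3 : n - 1 < 2 * ((n - 1) / 2 + 1) := by omega
  rw [pvGrid_eq n hn]
  have hdown := pvDown_eq n ((n - 1) / 2) hn h0 h2 ((n - 1) / 2 + 1).toNat ((n - 1) / 2) (by omega) (by omega) 0
  rw [show 2 * ((n - 1) / 2) - (n - 1) / 2 = (n - 1) / 2 by ring, sub_self] at hdown
  have hup := pvUp_eq n ((n - 1) / 2) hn h0 h2 ((n - 1) / 2).toNat ((n - 1) / 2) (by omega) (le_refl _)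
      (pvDownA (pvGrid n) ((n - 1) / 2) ((n - 1) / 2) 0 0)
  rw [show 2 * ((n - 1) / 2) - (n - 1) / 2 = (n - 1) / 2 by ring,
      show (n - 1) / 2 - (n - 1) / 2 - 1 = (-1 : Int) by ring] at hup
  rw [hup, hdown]
  exact pvFinal_arith n ((n - 1) / 2) hn h0 h2 h3
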